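-- pv_equiv track=rewrite | github.com/chenzongyao200127/leetcode_in_rust | src/灵犀互娱.py | can_form_triangle
-- ===== SOURCE A (Python) =====
-- def can_form_triangle(nums):
--     """Check if any three numbers can form a triangle."""
--     nums = [x for x in nums if x > 0]
--     if len(nums) < 3:
--         return False
--     nums.sort()
--     for i in range(len(nums) - 2):
--         if nums[i] + nums[i + 1] > nums[i + 2]:
--             return True
--     return False
-- ===== SOURCE B (Python) =====
-- def can_form_triangle(nums):
--     """Check if any three numbers can form a triangle."""
--     pos = [x for x in nums if x > 0]
--     for i in range(len(pos)):
--         for j in range(i + 1, len(pos)):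
--             for k in range(j + 1, len(pos)):
--                 a, b, c = pos[i], pos[j], pos[k]
--                 if a + b > c and a + c > b and b + c > a:
--                     return True
--     return False
-- ===== Notes on version B (the rewrite author's own statement) =====
-- stated objective: alternative
-- what changed: Replaces the sort-then-adjacent-triple scan with a direct brute-force search over all 3-element combinations of the positive entries, testing the full triangle inequality; no sorting and no mutation of the input.
import Mathlib
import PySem

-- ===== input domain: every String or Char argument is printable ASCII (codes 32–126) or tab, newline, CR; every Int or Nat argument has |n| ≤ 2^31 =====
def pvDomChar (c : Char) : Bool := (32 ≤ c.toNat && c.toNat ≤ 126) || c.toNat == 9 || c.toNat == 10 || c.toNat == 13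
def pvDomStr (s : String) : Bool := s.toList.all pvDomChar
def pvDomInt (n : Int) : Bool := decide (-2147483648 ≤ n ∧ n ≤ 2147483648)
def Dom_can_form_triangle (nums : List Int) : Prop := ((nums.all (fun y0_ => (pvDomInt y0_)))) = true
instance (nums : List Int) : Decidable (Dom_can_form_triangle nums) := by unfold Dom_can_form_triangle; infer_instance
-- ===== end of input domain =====

-- B replaces A's sort + adjacent-triple scan by a brute-force search over all 3-element
-- combinations of the positive entries (objective: alternative; B does not mutate its input,
-- while A's local `nums` rebinding means A does not either).

-- ===== PORT A =====
-- the `for i in range(len(nums)-2)` loop with its early return is the `any` over that range;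
-- `getD _ 0` only reads indices the range keeps in bounds, so the default is never used
def can_form_triangle (nums : List Int) : Bool :=
  if (nums.filter (fun x => decide (x > 0))).length < 3 then false
  else
    let s := PySem.List.sorted (nums.filter (fun x => decide (x > 0))) (fun x => x) false
    (List.range (s.length - 2)).any
      (fun i => decide (s.getD i 0 + s.getD (i+1) 0 > s.getD (i+2) 0))

-- ===== PORT B =====
-- the full triangle-inequality test on one candidate triple
def tri (a b c : Int) : Bool :=
  decide (a + b > c) && decide (a + c > b) && decide (b + c > a)

-- innermost loop: z ranges over zs (elements after y)
def triOne (x y : Int) : List Int → Bool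
  | [] => false
  | z :: zs => tri x y z || triOne x y zs

-- middle loop: y ranges over ys (elements after x)
def triPair (x : Int) : List Int → Bool
  | [] => false
  | y :: ys => triOne x y ys || triPair x ys

-- outer loop: x ranges over the list
def triAny : List Int → Bool
  | [] => false
  | x :: xs => triPair x xs || triAny xs

def can_form_triangle_alt (nums : List Int) : Bool :=
  triAny (nums.filter (fun x => decide (x > 0)))

-- ===== PRECONDITION & SPEC =====
def Spec_can_form_triangle (nums : List Int) (out : Bool) : Prop := out = can_form_triangle_alt nums
instance (nums : List Int) (out : Bool) : Decidable (Spec_can_form_triangle nums out) := by unfold Spec_can_form_triangle; infer_instance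

-- ===== CLAIM (what is proved, stated in full; the proofs are below) =====
def Claim_equal_can_form_triangle : Prop := ∀ (nums : List Int), Dom_can_form_triangle nums → Spec_can_form_triangle nums (can_form_triangle nums)

-- ===== LEMMAS AND PROOFS =====

theorem tri_of_perm {a b c x y z : Int} (h : ([a, b, c] : List Int).Perm [x, y, z])
    (ht : tri x y z = true) : tri a b c = true := by
  have hsum : a + b + c = x + y + z := by have := h.sum_eq; simp at this; omega
  have ha : a = x ∨ a = y ∨ a = z := by simpa using h.subset (by simp : a ∈ [a,b,c])
  have hb : b = x ∨ b = y ∨ b = z := by simpa using h.subset (by simp : b ∈ [a,b,c])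
  have hc : c = x ∨ c = y ∨ c = z := by simpa using h.subset (by simp : c ∈ [a,b,c])
  simp only [tri, Bool.and_eq_true, decide_eq_true_eq] at ht ⊢
  rcases ha with rfl|rfl|rfl <;> rcases hb with rfl|rfl|rfl <;> rcases hc with rfl|rfl|rfl <;> omega

-- characterization of B's nested loops: some 3-element sublist is a triangle
theorem triOne_iff (x y : Int) (l : List Int) :
    triOne x y l = true ↔ ∃ z ∈ l, tri x y z = true := by
  induction l with
  | nil => simp [triOne]
  | cons z zs ih => simp [triOne, ih]

theorem triPair_iff (x : Int) (l : List Int) :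
    triPair x l = true ↔ ∃ y z, ([y, z] : List Int).Sublist l ∧ tri x y z = true := by
  induction l with
  | nil => simp [triPair]
  | cons a as ih =>
    simp only [triPair, Bool.or_eq_true, ih, triOne_iff]
    constructor
    · rintro (⟨z, hz, ht⟩ | ⟨y, z, hs, ht⟩)
      · exact ⟨a, z, (List.singleton_sublist.mpr hz).cons₂ a, ht⟩
      · exact ⟨y, z, hs.cons a, ht⟩
    · rintro ⟨y, z, hs, ht⟩
      cases hs with
      | cons _ h => exact Or.inr ⟨y, z, h, ht⟩
      | cons₂ _ h => exact Or.inl ⟨z, List.singleton_sublist.mp h, ht⟩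

theorem triAny_iff (l : List Int) :
    triAny l = true ↔ ∃ x y z, ([x, y, z] : List Int).Sublist l ∧ tri x y z = true := by
  induction l with
  | nil => simp [triAny]
  | cons a as ih =>
    simp only [triAny, Bool.or_eq_true, ih, triPair_iff]
    constructor
    · rintro (⟨y, z, hs, ht⟩ | ⟨x, y, z, hs, ht⟩)
      · exact ⟨a, y, z, hs.cons₂ a, ht⟩
      · exact ⟨x, y, z, hs.cons a, ht⟩
    · rintro ⟨x, y, z, hs, ht⟩
      cases hs with
      | cons _ h => exact Or.inr ⟨x, y, z, h, ht⟩
      | cons₂ _ h => exact Or.inl ⟨y, z, h, ht⟩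

-- transfer a triangle triple across a permutation of the ambient list
theorem exists_tri_of_perm {l l' : List Int} (h : l.Perm l')
    (hx : ∃ x y z, ([x, y, z] : List Int).Sublist l ∧ tri x y z = true) :
    ∃ x y z, ([x, y, z] : List Int).Sublist l' ∧ tri x y z = true := by
  obtain ⟨x, y, z, hs, ht⟩ := hx
  have hsp : List.Subperm ([x, y, z] : List Int) l' := hs.subperm.trans h.subperm
  obtain ⟨u, hu, husub⟩ := hsp
  have hlen : u.length = 3 := by simpa using hu.length_eq
  match u, hlen with
  | [a, b, c], _ => exact ⟨a, b, c, husub, tri_of_perm hu ht⟩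

-- three consecutive entries form a sublist
theorem consec_sublist (s : List Int) (j : Nat) (h : j + 2 < s.length) :
    ([s[j]'(by omega), s[j+1]'(by omega), s[j+2]'h] : List Int).Sublist s := by
  have h1 : s.drop j = s[j]'(by omega) :: s.drop (j+1) := List.drop_eq_getElem_cons (by omega)
  have h2 : s.drop (j+1) = s[j+1]'(by omega) :: s.drop (j+2) := List.drop_eq_getElem_cons (by omega)
  have h3 : s.drop (j+2) = s[j+2]'h :: s.drop (j+3) := List.drop_eq_getElem_cons h
  have : ([s[j]'(by omega), s[j+1]'(by omega), s[j+2]'h] : List Int).Sublist (s.drop j) := by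
    rw [h1, h2, h3]
    exact ((List.nil_sublist _).cons₂ _).cons₂ _ |>.cons₂ _
  exact this.trans (List.drop_sublist j s)

-- index extraction from a 2- resp. 3-element sublist
theorem sub2_idx : ∀ {s : List Int} {y z : Int}, ([y, z] : List Int).Sublist s →
    ∃ j k, j < k ∧ k < s.length ∧ s.getD j 0 = y ∧ s.getD k 0 = z := by
  intro s
  induction s with
  | nil => intro y z h; simp at h
  | cons a t ih =>
    intro y z h
    cases h with
    | cons _ h =>
      obtain ⟨j, k, hjk, hk, hy, hz⟩ := ih h
      exact ⟨j+1, k+1, by omega, by simp; omega, by simpa using hy, by simpa using hz⟩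
    | cons₂ _ h =>
      obtain ⟨z', hz'⟩ := List.singleton_sublist.mp h |> List.mem_iff_getElem.mp
      obtain ⟨hk, hzeq⟩ := hz'
      exact ⟨0, z' + 1, by omega, by simp; omega, by simp,
        by simp [List.getD_eq_getElem?_getD, List.getElem?_eq_getElem hk, hzeq]⟩

theorem sub3_idx : ∀ {s : List Int} {x y z : Int}, ([x, y, z] : List Int).Sublist s →
    ∃ i j k, i < j ∧ j < k ∧ k < s.length ∧
      s.getD i 0 = x ∧ s.getD j 0 = y ∧ s.getD k 0 = z := by
  intro s
  induction s with
  | nil => intro x y z h; simp at h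
  | cons a t ih =>
    intro x y z h
    cases h with
    | cons _ h =>
      obtain ⟨i, j, k, hij, hjk, hk, hx, hy, hz⟩ := ih h
      exact ⟨i+1, j+1, k+1, by omega, by omega, by simp; omega,
        by simpa using hx, by simpa using hy, by simpa using hz⟩
    | cons₂ _ h =>
      obtain ⟨j, k, hjk, hk, hy, hz⟩ := sub2_idx h
      exact ⟨0, j+1, k+1, by omega, by omega, by simp; omega, by simp,
        by simpa using hy, by simpa using hz⟩

-- ===== VERDICT (by name: the statement is the Claim_ definition above) =====
theorem can_form_triangle_spec : Claim_equal_can_form_triangle := by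
  intro nums _
  unfold Spec_can_form_triangle can_form_triangle can_form_triangle_alt
  set pos := nums.filter (fun x => decide (x > 0)) with hposdef
  set s := PySem.List.sorted pos (fun x => x) false with hsdef
  have hperm : s.Perm pos := PySem.List.sorted_perm pos (fun x => x) false
  have hlen : s.length = pos.length := hperm.length_eq
  have hmem_pos : ∀ w ∈ s, 0 < w := by
    intro w hw
    have : w ∈ pos := hperm.subset hw
    rw [hposdef, List.mem_filter] at this
    exact of_decide_eq_true this.2
  have hmono : ∀ p q : Nat, (hpq : p ≤ q) → (hq : q < s.length) →
      s[p]'(by omega) ≤ s[q]'hq := by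
    intro p q hpq hq
    have hq' : q < (PySem.List.sorted pos (fun x => x) false).length := by
      rw [← hsdef]; exact hq
    have := PySem.List.sorted_id_getElem_mono pos hpq hq'
    simp only [hsdef]
    exact this
  rw [Bool.eq_iff_iff]
  constructor
  · -- A true → B true
    intro hA
    split at hA
    · exact absurd hA (by simp)
    · rename_i hge3
      rw [List.any_eq_true] at hA
      obtain ⟨j, hjr, hgt⟩ := hA
      rw [List.mem_range] at hjr
      have hj : j + 2 < s.length := by omega
      rw [decide_eq_true_eq, List.getD_eq_getElem s 0 (by omega),
        List.getD_eq_getElem s 0 (by omega), List.getD_eq_getElem s 0 hj] at hgt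
      rw [triAny_iff]
      apply exists_tri_of_perm hperm
      refine ⟨s[j]'(by omega), s[j+1]'(by omega), s[j+2]'hj, consec_sublist s j hj, ?_⟩
      have h01 : s[j]'(by omega) ≤ s[j+1]'(by omega) := hmono j (j+1) (by omega) (by omega)
      have h12 : s[j+1]'(by omega) ≤ s[j+2]'hj := hmono (j+1) (j+2) (by omega) hj
      have hp0 : 0 < s[j]'(by omega) := hmem_pos _ (List.getElem_mem _)
      have hp1 : 0 < s[j+1]'(by omega) := hmem_pos _ (List.getElem_mem _)
      simp only [tri, Bool.and_eq_true, decide_eq_true_eq]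
      omega
  · -- B true → A true
    intro hB
    rw [triAny_iff] at hB
    have hB' := exists_tri_of_perm hperm.symm hB
    obtain ⟨x, y, z, hs, ht⟩ := hB'
    obtain ⟨i, j, k, hij, hjk, hk, hx, hy, hz⟩ := sub3_idx hs
    have hk2 : 2 ≤ k := by omega
    have hlen3 : ¬ pos.length < 3 := by omega
    rw [if_neg hlen3, List.any_eq_true]
    refine ⟨k - 2, List.mem_range.mpr (by omega), ?_⟩
    have e2 : k - 2 + 2 = k := by omega
    have e1 : k - 2 + 1 = k - 1 := by omega
    rw [decide_eq_true_eq, e1, e2]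
    rw [List.getD_eq_getElem s 0 (by omega), List.getD_eq_getElem s 0 (by omega),
      List.getD_eq_getElem s 0 (by omega)]
    have hxi : s[i]'(by omega) = x := by rw [← hx, List.getD_eq_getElem s 0 (by omega)]
    have hyj : s[j]'(by omega) = y := by rw [← hy, List.getD_eq_getElem s 0 (by omega)]
    have hzk : s[k]'(by omega) = z := by rw [← hz, List.getD_eq_getElem s 0 (by omega)]
    have m1 : s[i]'(by omega) ≤ s[k-2]'(by omega) := hmono i (k-2) (by omega) (by omega)
    have m2 : s[j]'(by omega) ≤ s[k-1]'(by omega) := hmono j (k-1) (by omega) (by omega)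
    simp only [tri, Bool.and_eq_true, decide_eq_true_eq] at ht
    omega
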